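-- pv_equiv track=rewrite | github.com/xinruiy2/USC-Courses | CSCI 561/MP/hw2.py | find_eye
-- ===== SOURCE A (Python) =====
-- def find_eye(board,color):
--     eyeScore = 0
--     for i in range(5):
--         for j in range(5):
--             if board[i][j] == '0':
--                 IfMyEye = 1
--                 IfOpEye = -1
--                 for a, b in ((i+1,j),(i-1,j),(i,j+1),(i,j-1)):
--                     if 0 <= a < 5 and 0 <= b <5:
--                         if board[a][b] == '0':
--                             IfMyEye = 0
--                             IfOpEye = 0
--                             break
--                         elif board[a][b] == color:
--                             IfOpEye = 0
--                         else:
--                             IfMyEye = 0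
--                 eyeScore += IfOpEye + IfMyEye
--     return eyeScore
-- ===== SOURCE B (Python) =====
-- def find_eye(board, color):
--     # Stage 1: enumerate the directed adjacency edges of the 5x5 grid once.
--     edges = []
--     for i in range(5):
--         for j in range(4):
--             edges += [((i, j), (i, j + 1)), ((i, j + 1), (i, j)),
--                       ((j, i), (j + 1, i)), ((j + 1, i), (j, i))]
--     # Stage 2: one pass over the edges accumulates, for every cell, how many
--     # neighbours it has, how many are empty, and how many hold our color.
--     total = {}
--     zeros = {}
--     mine = {}
--     for i in range(5):
--         for j in range(5):
--             total[(i, j)] = 0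
--             zeros[(i, j)] = 0
--             mine[(i, j)] = 0
--     for c, n in edges:
--         v = board[n[0]][n[1]]
--         total[c] += 1
--         if v == '0':
--             zeros[c] += 1
--         elif v == color:
--             mine[c] += 1
--     # Stage 3: score each empty cell from its three counters.
--     score = 0
--     for i in range(5):
--         for j in range(5):
--             if board[i][j] == '0':
--                 if zeros[(i, j)]:
--                     pass
--                 elif mine[(i, j)] == total[(i, j)]:
--                     score += 1
--                 elif mine[(i, j)] == 0:
--                     score -= 1
--     return score
-- ===== Notes on version B (the rewrite author's own statement) =====
-- stated objective: alternative
-- what changed: A classifies each empty cell by mutating two flags with an early break while scanning its neighbours; B never scans neighbours per cell: it makes one pass over the grid's 80 directed adjacency edges to build three counter tables (neighbour count, empty-neighbour count, own-color-neighbour count) and then scores each empty cell purely from its counters.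
import Mathlib
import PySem

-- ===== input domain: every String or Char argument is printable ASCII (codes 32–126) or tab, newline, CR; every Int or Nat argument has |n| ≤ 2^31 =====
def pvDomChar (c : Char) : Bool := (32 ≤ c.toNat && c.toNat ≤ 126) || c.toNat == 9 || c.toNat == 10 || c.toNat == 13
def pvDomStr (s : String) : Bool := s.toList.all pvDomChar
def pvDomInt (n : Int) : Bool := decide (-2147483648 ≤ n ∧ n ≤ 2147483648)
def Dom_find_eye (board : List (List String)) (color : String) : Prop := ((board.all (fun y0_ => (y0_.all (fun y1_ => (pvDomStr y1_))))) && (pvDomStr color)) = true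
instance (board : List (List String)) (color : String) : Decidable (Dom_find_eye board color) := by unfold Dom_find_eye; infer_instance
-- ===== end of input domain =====

-- B replaces A's per-cell flag/break neighbour scan by an edge-centric algorithm:
-- one pass over the 80 directed adjacency edges of the 5x5 grid builds three
-- counter tables, and each empty cell is then scored from its counters alone;
-- objective: alternative (same cost, different algorithm).

-- board[x][y] (total form; Pre_ guarantees the indices used are in range)
def pvCell (board : List (List String)) (a b : Int) : String :=
  (PySem.List.pyGet? ((PySem.List.pyGet? board a).getD []) b).getD ""

-- ===== PORT A =====
-- the inner 'for a, b in (...)' loop carrying the two flags (IfMyEye, IfOpEye);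
-- returns their final values ('break' = return (0, 0))
def pvALoop (board : List (List String)) (color : String) :
    List (Int × Int) → Int → Int → Int × Int
  | [], m, o => (m, o)
  | (a, b) :: rest, m, o =>
    if 0 ≤ a ∧ a < 5 ∧ 0 ≤ b ∧ b < 5 then
      if pvCell board a b == "0" then (0, 0)
      else if pvCell board a b == color then pvALoop board color rest m 0
      else pvALoop board color rest 0 o
    else pvALoop board color rest m o

def find_eye (board : List (List String)) (color : String) : Int :=
  (PySem.List.pyRange 0 5 1).foldl (fun eyeScore i =>
    (PySem.List.pyRange 0 5 1).foldl (fun eyeScore j =>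
      if pvCell board i j == "0" then
        let p := pvALoop board color [(i+1, j), (i-1, j), (i, j+1), (i, j-1)] 1 (-1)
        eyeScore + (p.2 + p.1)
      else eyeScore) eyeScore) 0

-- ===== PORT B =====
-- Stage 1: the directed adjacency edges, built once (board-independent)
def pvEdges : List ((Int × Int) × (Int × Int)) :=
  (PySem.List.pyRange 0 5 1).foldl (fun es i =>
    (PySem.List.pyRange 0 4 1).foldl (fun es j =>
      es ++ [((i, j), (i, j + 1)), ((i, j + 1), (i, j)),
             ((j, i), (j + 1, i)), ((j + 1, i), (j, i))]) es) []

-- the three counter dicts, all keys initialised to 0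
def pvInit3 : PySem.Dict (Int × Int) Int × PySem.Dict (Int × Int) Int × PySem.Dict (Int × Int) Int :=
  (PySem.List.pyRange 0 5 1).foldl (fun s i =>
    (PySem.List.pyRange 0 5 1).foldl (fun s j =>
      (s.1.insert (i, j) 0, s.2.1.insert (i, j) 0, s.2.2.insert (i, j) 0)) s)
    (PySem.Dict.empty, PySem.Dict.empty, PySem.Dict.empty)

-- Stage 2 loop body: total[c] += 1; if v == '0': zeros[c] += 1 elif v == color: mine[c] += 1
-- (every key read is present: initialised for every in-range cell, and every edge endpoint is in range)
def pvEdgeStep (board : List (List String)) (color : String)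
    (s : PySem.Dict (Int × Int) Int × PySem.Dict (Int × Int) Int × PySem.Dict (Int × Int) Int)
    (e : (Int × Int) × (Int × Int)) :
    PySem.Dict (Int × Int) Int × PySem.Dict (Int × Int) Int × PySem.Dict (Int × Int) Int :=
  let v := pvCell board e.2.1 e.2.2
  let t := s.1.insert e.1 (s.1.getD e.1 0 + 1)
  if v == "0" then (t, s.2.1.insert e.1 (s.2.1.getD e.1 0 + 1), s.2.2)
  else if v == color then (t, s.2.1, s.2.2.insert e.1 (s.2.2.getD e.1 0 + 1))
  else (t, s.2.1, s.2.2)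

def find_eye_alt (board : List (List String)) (color : String) : Int :=
  let s := pvEdges.foldl (pvEdgeStep board color) pvInit3
  (PySem.List.pyRange 0 5 1).foldl (fun score i =>
    (PySem.List.pyRange 0 5 1).foldl (fun score j =>
      if pvCell board i j == "0" then
        if s.2.1.getD (i, j) 0 != 0 then score
        else if s.2.2.getD (i, j) 0 == s.1.getD (i, j) 0 then score + 1
        else if s.2.2.getD (i, j) 0 == 0 then score - 1
        else score
      else score) score) 0

-- ===== PRECONDITION & SPEC =====
-- Pre_: both Pythons index board[i][j] for all 0 ≤ i, j < 5 and raise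
-- IndexError iff the board has fewer than 5 rows or one of the first 5 rows
-- has fewer than 5 entries; exactly those inputs are excluded.
def Pre_find_eye (board : List (List String)) (color : String) : Prop :=
  5 ≤ board.length ∧ ∀ r ∈ board.take 5, 5 ≤ r.length
instance (board : List (List String)) (color : String) : Decidable (Pre_find_eye board color) := by unfold Pre_find_eye; infer_instance

def pvWitness_find_eye : List (List String) × String :=
  ([["1", "0", "1", "2", "0"],
    ["0", "1", "2", "0", "1"],
    ["1", "1", "0", "1", "1"],
    ["2", "0", "1", "1", "0"],
    ["0", "1", "1", "0", "1"]], "1")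

def Spec_find_eye (board : List (List String)) (color : String) (out : Int) : Prop := out = find_eye_alt board color
instance (board : List (List String)) (color : String) (out : Int) : Decidable (Spec_find_eye board color out) := by unfold Spec_find_eye; infer_instance

-- ===== CLAIM (what is proved, stated in full; the proofs are below) =====
def Claim_equal_find_eye : Prop := ∀ (board : List (List String)) (color : String), Dom_find_eye board color → Pre_find_eye board color → Spec_find_eye board color (find_eye board color)

-- ===== LEMMAS AND PROOFS =====

-- A's inner loop, with the bounds test already discharged: a pure fold over the
-- neighbour VALUES
def pvVLoop (color : String) : List String → Int → Int → Int × Int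
  | [], m, o => (m, o)
  | v :: rest, m, o =>
    if v == "0" then (0, 0)
    else if v == color then pvVLoop color rest m 0
    else pvVLoop color rest 0 o

def pvInb (p : Int × Int) : Bool := decide (0 ≤ p.1 ∧ p.1 < 5 ∧ 0 ≤ p.2 ∧ p.2 < 5)

-- the in-bounds neighbour values of cell (i, j)
def pvNbrs (board : List (List String)) (i j : Int) : List String :=
  (([(i+1, j), (i-1, j), (i, j+1), (i, j-1)].filter pvInb)).map (fun p => pvCell board p.1 p.2)

theorem pvALoop_eq_vLoop (board : List (List String)) (color : String) :
    ∀ (coords : List (Int × Int)) (m o : Int),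
      pvALoop board color coords m o =
        pvVLoop color ((coords.filter pvInb).map (fun p => pvCell board p.1 p.2)) m o := by
  intro coords
  induction coords with
  | nil => intro m o; rfl
  | cons hd tl ih =>
    intro m o
    obtain ⟨a, b⟩ := hd
    by_cases h : 0 ≤ a ∧ a < 5 ∧ 0 ≤ b ∧ b < 5
    · simp only [pvALoop, if_pos h, List.filter_cons, pvInb, decide_eq_true_eq]
      simp only [List.map_cons, pvVLoop]
      split
      · rfl
      · split <;> exact ih _ _
    · simp only [pvALoop, if_neg h, List.filter_cons, pvInb]
      simp only [decide_eq_true_eq, h, ite_false]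
      exact ih _ _

theorem pvVLoop_char (color : String) :
    ∀ (ns : List String) (m o : Int),
      pvVLoop color ns m o =
        ((if "0" ∈ ns then 0 else if ns.all (· == color) then m else 0),
         (if "0" ∈ ns then 0 else if ns.any (· == color) then 0 else o)) := by
  intro ns
  induction ns with
  | nil => intro m o; simp [pvVLoop]
  | cons v rest ih =>
    intro m o
    by_cases h0 : v = "0"
    · simp [pvVLoop, h0]
    · by_cases hc : v = color
      · subst hc
        simp only [pvVLoop, beq_iff_eq, h0, ite_false, ite_true]
        rw [ih]
        simp [Ne.symm h0]
      · simp only [pvVLoop, beq_iff_eq, if_neg h0, if_neg hc]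
        rw [ih]
        simp [Ne.symm h0, hc]

-- the three counting predicates of the edge pass, as predicates on an edge
def pvPT (c : Int × Int) : (Int × Int) × (Int × Int) → Bool := fun e => e.1 == c
def pvQZ (board : List (List String)) : (Int × Int) × (Int × Int) → Bool :=
  fun e => pvCell board e.2.1 e.2.2 == "0"
def pvQM (board : List (List String)) (color : String) : (Int × Int) × (Int × Int) → Bool :=
  fun e => !(pvCell board e.2.1 e.2.2 == "0") && (pvCell board e.2.1 e.2.2 == color)
def pvPZ (board : List (List String)) (c : Int × Int) : (Int × Int) × (Int × Int) → Bool :=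
  fun e => pvQZ board e && pvPT c e
def pvPM (board : List (List String)) (color : String) (c : Int × Int) :
    (Int × Int) × (Int × Int) → Bool :=
  fun e => pvQM board color e && pvPT c e

-- one step of the edge pass, per counter
theorem pvGetD_insert_inc (d : PySem.Dict (Int × Int) Int) (k c : Int × Int) :
    (d.insert k (d.getD k 0 + 1)).getD c 0 =
      d.getD c 0 + (if (k == c) = true then 1 else 0) := by
  rw [PySem.Dict.getD_insert]
  by_cases hk : c = k
  · subst hk; simp
  · simp [hk, beq_eq_false_iff_ne.mpr (Ne.symm hk)]

theorem pvStep_getD (board : List (List String)) (color : String)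
    (s : PySem.Dict (Int × Int) Int × PySem.Dict (Int × Int) Int × PySem.Dict (Int × Int) Int)
    (e : (Int × Int) × (Int × Int)) (c : Int × Int) :
    (pvEdgeStep board color s e).1.getD c 0 = s.1.getD c 0 + (if pvPT c e then 1 else 0) ∧
    (pvEdgeStep board color s e).2.1.getD c 0 = s.2.1.getD c 0 + (if pvPZ board c e then 1 else 0) ∧
    (pvEdgeStep board color s e).2.2.getD c 0 = s.2.2.getD c 0 + (if pvPM board color c e then 1 else 0) := by
  unfold pvEdgeStep pvPT pvPZ pvPM pvQZ pvQM
  cases h0 : pvCell board e.2.1 e.2.2 == "0" with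
  | true =>
    simp only [h0, if_true, Bool.true_and, Bool.not_true, Bool.false_and, Bool.false_eq_true,
      if_false]
    exact ⟨pvGetD_insert_inc _ _ _, pvGetD_insert_inc _ _ _, by simp⟩
  | false =>
    cases hc : pvCell board e.2.1 e.2.2 == color with
    | true =>
      simp only [h0, hc, Bool.false_eq_true, if_false, if_true, Bool.false_and, Bool.not_false,
        Bool.true_and]
      exact ⟨pvGetD_insert_inc _ _ _, by simp, pvGetD_insert_inc _ _ _⟩
    | false =>
      simp only [h0, hc, Bool.false_eq_true, if_false, Bool.false_and, Bool.not_false,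
        Bool.true_and]
      exact ⟨pvGetD_insert_inc _ _ _, by simp, by simp⟩

-- invariant of the edge pass: each counter equals its start value plus a countP
theorem pvFold_counts (board : List (List String)) (color : String) :
    ∀ (L : List ((Int × Int) × (Int × Int)))
      (s : PySem.Dict (Int × Int) Int × PySem.Dict (Int × Int) Int × PySem.Dict (Int × Int) Int)
      (c : Int × Int),
      (L.foldl (pvEdgeStep board color) s).1.getD c 0 = s.1.getD c 0 + L.countP (pvPT c) ∧
      (L.foldl (pvEdgeStep board color) s).2.1.getD c 0 = s.2.1.getD c 0 + L.countP (pvPZ board c) ∧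
      (L.foldl (pvEdgeStep board color) s).2.2.getD c 0 = s.2.2.getD c 0 + L.countP (pvPM board color c) := by
  intro L
  induction L with
  | nil => intro s c; simp
  | cons e L ih =>
    intro s c
    obtain ⟨i1, i2, i3⟩ := ih (pvEdgeStep board color s e) c
    obtain ⟨e1, e2, e3⟩ := pvStep_getD board color s e c
    simp only [List.foldl_cons, List.countP_cons]
    refine ⟨?_, ?_, ?_⟩
    · rw [i1, e1]; split <;> push_cast <;> ring
    · rw [i2, e2]; split <;> push_cast <;> ring
    · rw [i3, e3]; split <;> push_cast <;> ring

-- a dict all of whose stored values are 0 reads 0 everywhere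
theorem pvGetD_zero_of_all_zero (d : PySem.Dict (Int × Int) Int)
    (h : ∀ p ∈ d.items, p.2 = (0 : Int)) (c : Int × Int) : d.getD c 0 = 0 := by
  rw [PySem.Dict.getD_eq_get?_getD]
  cases hg : d.get? c with
  | none => rfl
  | some v => exact h _ (PySem.Dict.mem_items_of_get?_eq_some d hg)

-- all counters start at 0
theorem pvInit3_zero (c : Int × Int) :
    pvInit3.1.getD c 0 = 0 ∧ pvInit3.2.1.getD c 0 = 0 ∧ pvInit3.2.2.getD c 0 = 0 :=
  ⟨pvGetD_zero_of_all_zero _ (by decide) c,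
   pvGetD_zero_of_all_zero _ (by decide) c,
   pvGetD_zero_of_all_zero _ (by decide) c⟩

-- for an in-range cell, the edges out of it reach exactly its in-bounds neighbours
theorem pvEdges_perm :
    ∀ i ∈ PySem.List.pyRange 0 5 1, ∀ j ∈ PySem.List.pyRange 0 5 1,
      ((pvEdges.filter (pvPT (i, j))).map (·.2)).Perm
        ([(i+1, j), (i-1, j), (i, j+1), (i, j-1)].filter pvInb) := by
  decide

-- the three edge-pass counts, read off at cell (i, j), are the neighbour-list counts
theorem pv_counts_eq (board : List (List String)) (color : String) (i j : Int)
    (hi : i ∈ PySem.List.pyRange 0 5 1) (hj : j ∈ PySem.List.pyRange 0 5 1) :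
    pvEdges.countP (pvPT (i, j)) = (pvNbrs board i j).length ∧
    pvEdges.countP (pvPZ board (i, j)) = (pvNbrs board i j).countP (fun v => v == "0") ∧
    pvEdges.countP (pvPM board color (i, j)) =
      (pvNbrs board i j).countP (fun v => !(v == "0") && (v == color)) := by
  have hperm := pvEdges_perm i hi j hj
  have hpermv := hperm.map (fun p => pvCell board p.1 p.2)
  refine ⟨?_, ?_, ?_⟩
  · rw [List.countP_eq_length_filter, pvNbrs, List.length_map, ← hperm.length_eq,
      List.length_map]
  · have h := hpermv.countP_eq (fun v => v == "0")
    rw [List.countP_map, List.countP_map] at h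
    rw [pvNbrs, ← h, List.countP_filter]
    rfl
  · have h := hpermv.countP_eq (fun v => !(v == "0") && (v == color))
    rw [List.countP_map, List.countP_map] at h
    rw [pvNbrs, ← h, List.countP_filter]
    rfl

-- the per-cell bridge: counter classification = flags-with-break value
theorem pv_cell_bridge (color : String) (ns : List String) (hne : ns ≠ []) (s : Int) :
    (if ((ns.countP (fun v => v == "0") : Int) != 0) = true then s
     else if ((ns.countP (fun v => !(v == "0") && (v == color)) : Int) == (ns.length : Int)) = true then s + 1
     else if ((ns.countP (fun v => !(v == "0") && (v == color)) : Int) == 0) = true then s - 1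
     else s)
    = s + ((pvVLoop color ns 1 (-1)).2 + (pvVLoop color ns 1 (-1)).1) := by
  rw [pvVLoop_char]
  by_cases h0 : "0" ∈ ns
  · have hz : 0 < ns.countP (fun v => v == "0") :=
      List.countP_pos_iff.mpr ⟨"0", h0, by simp⟩
    have hb : ((ns.countP (fun v => v == "0") : Int) != 0) = true := by
      simp only [bne_iff_ne, ne_eq, Nat.cast_eq_zero]
      omega
    simp only [h0, if_true, hb]
    ring
  · have hz : ns.countP (fun v => v == "0") = 0 :=
      List.countP_eq_zero.mpr (fun a ha hpa => h0 (by rwa [eq_of_beq hpa] at ha))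
    have hmcnt : ns.countP (fun v => !(v == "0") && (v == color)) =
        ns.countP (fun v => v == color) := by
      refine List.countP_congr (fun x hx => ?_)
      have hx0 : x ≠ "0" := fun hx0 => h0 (hx0 ▸ hx)
      simp [hx0]
    have hlp : 0 < ns.length := List.length_pos_iff.mpr hne
    simp only [h0, if_false, hz, hmcnt, Nat.cast_zero, bne_self_eq_false, Bool.false_eq_true,
      if_false]
    by_cases hall : ns.all (· == color) = true
    · have hany : ns.any (· == color) = true := by
        obtain ⟨y, hy⟩ := List.exists_mem_of_ne_nil ns hne
        exact List.any_eq_true.mpr ⟨y, hy, List.all_eq_true.mp hall y hy⟩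
      have hlen : ns.countP (fun v => v == color) = ns.length :=
        List.countP_eq_length.mpr (List.all_eq_true.mp hall)
      simp only [hall, hany, hlen, if_true, beq_self_eq_true]
      ring
    · have hnl : ns.countP (fun v => v == color) ≠ ns.length := fun h =>
        hall (List.all_eq_true.mpr (List.countP_eq_length.mp h))
      have hb1 : ((ns.countP (fun v => v == color) : Int) == (ns.length : Int)) = false := by
        simp only [beq_eq_false_iff_ne, ne_eq, Nat.cast_inj]
        exact hnl
      by_cases hany : ns.any (· == color) = true
      · have hpos : 0 < ns.countP (fun v => v == color) := by
          obtain ⟨y, hy, hyc⟩ := List.any_eq_true.mp hany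
          exact List.countP_pos_iff.mpr ⟨y, hy, hyc⟩
        have hb2 : ((ns.countP (fun v => v == color) : Int) == 0) = false := by
          simp only [beq_eq_false_iff_ne, ne_eq, Nat.cast_eq_zero]
          omega
        simp only [hall, hany, hb1, hb2, Bool.false_eq_true, if_false, if_true]
        ring
      · have hzero : ns.countP (fun v => v == color) = 0 :=
          List.countP_eq_zero.mpr (fun a ha hpa => hany (List.any_eq_true.mpr ⟨a, ha, hpa⟩))
        have hb2 : ((0 : Int) == (ns.length : Int)) = false := by
          simp only [beq_eq_false_iff_ne, ne_eq]
          omega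
        simp only [hall, hany, hzero, Nat.cast_zero, hb2, Bool.false_eq_true, if_false,
          beq_self_eq_true, if_true]
        ring

-- the in-bounds neighbour list of an in-range cell is nonempty
theorem pvNbrs_ne_nil (board : List (List String)) (i j : Int)
    (hi : 0 ≤ i ∧ i < 5) (hj : 0 ≤ j ∧ j < 5) : pvNbrs board i j ≠ [] := by
  have hfil : (([(i+1, j), (i-1, j), (i, j+1), (i, j-1)] : List (Int × Int)).filter pvInb) ≠ [] := by
    intro hnil
    rw [List.filter_eq_nil_iff] at hnil
    have h1 := hnil (i+1, j) (by simp)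
    have h2 := hnil (i-1, j) (by simp)
    simp only [pvInb, decide_eq_true_eq] at h1 h2
    omega
  simpa [pvNbrs] using hfil

-- ===== VERDICT (by name: the statement is the Claim_ definition above) =====
theorem find_eye_spec : Claim_equal_find_eye := by
  intro board color _ _
  unfold Spec_find_eye find_eye find_eye_alt
  apply PySem.List.foldl_congr_mem'
  intro i hi acc
  apply PySem.List.foldl_congr_mem'
  intro j hj acc'
  have hib : 0 ≤ i ∧ i < 5 := by
    have := PySem.List.mem_pyRange_one.mp hi; omega
  have hjb : 0 ≤ j ∧ j < 5 := by
    have := PySem.List.mem_pyRange_one.mp hj; omega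
  by_cases hc : pvCell board i j == "0"
  · obtain ⟨hf1, hf2, hf3⟩ := pvFold_counts board color pvEdges pvInit3 (i, j)
    obtain ⟨hi1, hi2, hi3⟩ := pvInit3_zero (i, j)
    obtain ⟨hc1, hc2, hc3⟩ := pv_counts_eq board color i j hi hj
    have hne := pvNbrs_ne_nil board i j hib hjb
    simp only [hc, if_true]
    rw [pvALoop_eq_vLoop]
    rw [hf1, hf2, hf3, hi1, hi2, hi3, zero_add, zero_add, zero_add, hc1, hc2, hc3]
    exact (pv_cell_bridge color (pvNbrs board i j) hne acc').symm
  · simp [hc]
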